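-- pv_equiv track=rewrite | github.com/Zhanqiu-Guo/Data-Structure-Algorithm | homework/homework4/zg2238_hw4_q5.py | is_number_of_lowercase_even
-- ===== SOURCE A (Python) =====
-- def is_number_of_lowercase_even(s, low, high):
--     if low == high:
--         if s[low]==s[low].lower():
--             return False
--         return True
--     else:
--         flag = is_number_of_lowercase_even(s,low+1,high)
--         if s[low]==s[low].lower():
--             if flag == True:
--                 flag = False
--             else:
--                 flag = True
--         return flag
-- ===== SOURCE B (Python) =====
-- def is_number_of_lowercase_even(s, low, high):
--     count = 0
--     i = low
--     while True:
--         if s[i] == s[i].lower():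
--             count += 1
--         if i == high:
--             break
--         i += 1
--     return count % 2 == 0
-- ===== Notes on version B (the rewrite author's own statement) =====
-- stated objective: simpler
-- what changed: Replaces A's non-tail recursion with a parity-flipping boolean flag by a single iterative do-while loop over the inclusive range [low, high] that counts matching characters and returns count % 2 == 0.
import Mathlib
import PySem

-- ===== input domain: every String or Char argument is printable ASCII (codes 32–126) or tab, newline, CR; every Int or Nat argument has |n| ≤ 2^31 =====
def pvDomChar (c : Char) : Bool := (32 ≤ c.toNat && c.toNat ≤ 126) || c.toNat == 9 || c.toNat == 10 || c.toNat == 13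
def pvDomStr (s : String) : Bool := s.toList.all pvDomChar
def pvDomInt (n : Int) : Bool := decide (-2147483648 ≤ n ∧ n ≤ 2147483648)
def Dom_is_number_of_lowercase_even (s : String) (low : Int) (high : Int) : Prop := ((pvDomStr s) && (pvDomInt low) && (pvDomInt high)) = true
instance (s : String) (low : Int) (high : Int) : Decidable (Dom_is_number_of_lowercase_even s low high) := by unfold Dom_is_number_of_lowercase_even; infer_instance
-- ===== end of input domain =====

-- B replaces A's parity-flipping recursion by an iterative counting loop over [low, high] with `count % 2 == 0` (simpler; same cost).

-- ===== PORT A =====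
-- the Python predicate s[i] == s[i].lower() on one character (exact on ASCII)
def pvIsLowEq (c : Char) : Bool := c == PySem.Chars.lowerChar c

-- A's recursion on `low`, transliterated with fuel = high - low (A raises when low > high;
-- the fuel-0 fallback is outside Pre_). Indexing is pyGetD: valid under Pre_'s InRange.
def pvGoA (cs : List Char) (high : Int) : Nat → Int → Bool
  | fuel, low =>
    if low = high then
      if pvIsLowEq (PySem.List.pyGetD cs low ' ') then false else true
    else
      match fuel with
      | 0 => false
      | n + 1 =>
        let flag := pvGoA cs high n (low + 1)
        if pvIsLowEq (PySem.List.pyGetD cs low ' ') then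
          (if flag = true then false else true)
        else flag

def is_number_of_lowercase_even (s : String) (low : Int) (high : Int) : Bool :=
  pvGoA s.toList high (high - low).toNat low

-- ===== PORT B =====
-- B's do-while loop (`while True: … if i == high: break; i += 1`), with fuel = high - low
-- (the loop raises IndexError when low > high, like A; the fuel-0 fallback is outside Pre_).
def pvGoB (cs : List Char) (high : Int) : Nat → Int → Int → Int
  | fuel, i, count =>
    let count' := if pvIsLowEq (PySem.List.pyGetD cs i ' ') then count + 1 else count
    if i = high then count'
    else
      match fuel with
      | 0 => count'
      | n + 1 => pvGoB cs high n (i + 1) count'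

def is_number_of_lowercase_even_alt (s : String) (low : Int) (high : Int) : Bool :=
  let count := pvGoB s.toList high (high - low).toNat low 0
  count % 2 == 0

-- ===== PRECONDITION & SPEC =====
-- Pre_: the non-empty ranges with both endpoints valid Python indices (negative allowed);
-- low > high makes A recurse forever (RecursionError), an out-of-range index raises IndexError.
def Pre_is_number_of_lowercase_even (s : String) (low : Int) (high : Int) : Prop :=
  low ≤ high ∧ PySem.Raise.InRange s.toList.length low ∧ PySem.Raise.InRange s.toList.length high
instance (s : String) (low : Int) (high : Int) : Decidable (Pre_is_number_of_lowercase_even s low high) := by unfold Pre_is_number_of_lowercase_even; infer_instance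

def pvWitness_is_number_of_lowercase_even : String × Int × Int := ("aBc", 0, 2)

def Spec_is_number_of_lowercase_even (s : String) (low : Int) (high : Int) (out : Bool) : Prop := out = is_number_of_lowercase_even_alt s low high
instance (s : String) (low : Int) (high : Int) (out : Bool) : Decidable (Spec_is_number_of_lowercase_even s low high out) := by unfold Spec_is_number_of_lowercase_even; infer_instance

-- ===== CLAIM (what is proved, stated in full; the proofs are below) =====
def Claim_equal_is_number_of_lowercase_even : Prop := ∀ (s : String) (low : Int) (high : Int), Dom_is_number_of_lowercase_even s low high → Pre_is_number_of_lowercase_even s low high → Spec_is_number_of_lowercase_even s low high (is_number_of_lowercase_even s low high)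

-- ===== LEMMAS AND PROOFS =====

-- parity of (k+1) is the flip of parity of k, for k ≥ 0
theorem pv_parity_flip (k : Int) :
    ((k + 1) % 2 == 0) = (if (k % 2 == 0) = true then false else true) := by
  by_cases h : k % 2 = 0 <;> simp [h, beq_iff_eq] <;> omega

-- A's recursion computes the parity of the count of matching characters in [low, high]
theorem pvGoA_eq_parity (cs : List Char) (high : Int) (fuel : Nat) (low : Int)
    (hf : fuel = (high - low).toNat) (hle : low ≤ high) :
    pvGoA cs high fuel low =
      ((((PySem.List.pyRange low (high + 1) 1).countP
          (fun i => pvIsLowEq (PySem.List.pyGetD cs i ' '))) : Int) % 2 == 0) := by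
  induction fuel generalizing low with
  | zero =>
    have heq : low = high := by omega
    subst heq
    rw [pvGoA, if_pos rfl, PySem.List.pyRange_one_singleton]
    by_cases h : pvIsLowEq (PySem.List.pyGetD cs low ' ') = true <;>
      simp [List.countP, List.countP.go, h]
  | succ n ih =>
    have hlt : low < high := by omega
    rw [pvGoA, if_neg (by omega)]
    have hrec := ih (low + 1) (by omega) (by omega)
    rw [PySem.List.pyRange_one_cons (by omega), List.countP_cons]
    by_cases h : pvIsLowEq (PySem.List.pyGetD cs low ' ') = true
    · simp only [h, if_true]
      rw [hrec]
      push_cast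
      rw [pv_parity_flip]
    · simp only [h, if_false, Bool.false_eq_true]
      rw [hrec]
      norm_num

-- B's loop computes count + (number of matching characters in [i, high])
theorem pvGoB_eq_count (cs : List Char) (high : Int) (fuel : Nat) (i count : Int)
    (hf : fuel = (high - i).toNat) (hle : i ≤ high) :
    pvGoB cs high fuel i count =
      count + (((PySem.List.pyRange i (high + 1) 1).countP
          (fun j => pvIsLowEq (PySem.List.pyGetD cs j ' '))) : Int) := by
  induction fuel generalizing i count with
  | zero =>
    have heq : i = high := by omega
    subst heq
    rw [pvGoB, PySem.List.pyRange_one_singleton]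
    by_cases h : pvIsLowEq (PySem.List.pyGetD cs i ' ') = true <;>
      simp [List.countP, List.countP.go, h]
  | succ n ih =>
    have hlt : i < high := by omega
    rw [pvGoB]
    simp only [if_neg (by omega : ¬ i = high)]
    rw [ih (i + 1) _ (by omega) (by omega),
      PySem.List.pyRange_one_cons (by omega : i < high + 1), List.countP_cons]
    by_cases h : pvIsLowEq (PySem.List.pyGetD cs i ' ') = true <;> simp [h] <;> push_cast <;> ring

-- ===== VERDICT (by name: the statement is the Claim_ definition above) =====
theorem is_number_of_lowercase_even_spec : Claim_equal_is_number_of_lowercase_even := by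
  intro s low high _ hpre
  obtain ⟨hle, _, _⟩ := hpre
  unfold Spec_is_number_of_lowercase_even is_number_of_lowercase_even is_number_of_lowercase_even_alt
  rw [pvGoA_eq_parity s.toList high _ low rfl hle]
  rw [pvGoB_eq_count s.toList high _ low 0 rfl hle]
  norm_num
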